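-- pv_equiv track=rewrite | github.com/bruno-portfolio/agrobr | agrobr/anda/parser.py | _expand_newline_cells
-- ===== SOURCE A (Python) =====
-- def _expand_newline_cells(table: list[list[str | None]]) -> list[list[str]]:
--     if not table or len(table) < 2:
--         return [[str(c).strip() if c else "" for c in row] for row in table]
--
--     clean = [[str(c).strip() if c else "" for c in row] for row in table]
--
--     max_lines = 0
--     for row in clean:
--         for cell in row:
--             n = cell.count("\n") + 1
--             if n > max_lines:
--                 max_lines = n
--
--     if max_lines < 5:
--         return clean
--
--     expanded: list[list[str]] = []
--     for row in clean:
--         splits = [cell.split("\n") for cell in row]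
--         n_lines = max(len(s) for s in splits)
--         if n_lines < 2:
--             expanded.append(row)
--         else:
--             for i in range(n_lines):
--                 new_row = [s[i].strip() if i < len(s) else "" for s in splits]
--                 expanded.append(new_row)
--
--     return expanded
-- ===== SOURCE B (Python) =====
-- def _transpose_longest(splits):
--     """Transpose ragged columns row-by-row, stripping each emitted value
--     (missing entries become '')."""
--     out = []
--     while any(splits):
--         out.append([s[0].strip() if s else "" for s in splits])
--         splits = [s[1:] for s in splits]
--     return out
--
--
-- def _expand_row(row):
--     splits = [cell.split("\n") for cell in row]
--     if max(len(s) for s in splits) < 2: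
--         return [row]
--     return _transpose_longest(splits)
--
--
-- def _expand_newline_cells(table):
--     if len(table) < 2:
--         return [[str(c).strip() if c else "" for c in row] for row in table]
--
--     clean = [[str(c).strip() if c else "" for c in row] for row in table]
--
--     if not any(cell.count("\n") >= 4 for row in clean for cell in row):
--         return clean
--
--     return [new_row for row in clean for new_row in _expand_row(row)]
-- ===== Notes on version B (the rewrite author's own statement) =====
-- stated objective: idiomatic
-- what changed: The max_lines tracking loop is replaced by a short-circuiting any() existence test, and the index loop with per-cell bounds checks is replaced by a helper that transposes the ragged split columns row-by-row (a hand-rolled zip_longest), the result assembled with a flattening comprehension instead of an accumulator list.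
import Mathlib
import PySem

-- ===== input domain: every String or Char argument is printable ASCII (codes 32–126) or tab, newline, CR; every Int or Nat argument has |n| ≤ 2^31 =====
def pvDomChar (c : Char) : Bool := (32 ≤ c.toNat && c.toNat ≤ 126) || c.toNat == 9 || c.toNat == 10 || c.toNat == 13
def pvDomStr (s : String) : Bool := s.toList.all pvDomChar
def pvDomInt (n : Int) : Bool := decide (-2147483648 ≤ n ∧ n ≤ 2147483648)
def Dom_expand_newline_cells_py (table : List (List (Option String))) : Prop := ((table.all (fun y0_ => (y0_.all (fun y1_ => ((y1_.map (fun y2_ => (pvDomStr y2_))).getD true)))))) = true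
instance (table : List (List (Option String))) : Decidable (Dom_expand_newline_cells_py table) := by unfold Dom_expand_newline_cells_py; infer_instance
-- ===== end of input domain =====

-- B replaces A's max_lines tracking loop by a short-circuiting any() test and A's index
-- loop with bounds checks by a ragged transpose helper + flattening comprehension (idiomatic;
-- not claimed faster).

-- ===== PORT A =====
-- 'str(c).strip() if c else ""' (shared by both ports: both Pythons contain the same cleaning pass)
def pvCleanCell (c : Option String) : String :=
  match c with
  | none => ""
  | some s => if s = "" then "" else PySem.Str.strip s

def pvClean (table : List (List (Option String))) : List (List String) :=
  table.map (fun row => row.map pvCleanCell)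

-- 'max(len(s) for s in splits)' raises ValueError on an empty row: the '.getD 0' / '.getD []'
-- defaults are never reached inside Pre_ (rows nonempty when expansion is reached; sep "\n" ≠ "").
def expand_newline_cells_py (table : List (List (Option String))) : List (List String) :=
  if table = [] ∨ table.length < 2 then
    pvClean table
  else
    if (pvClean table).foldl (fun m row => row.foldl (fun m cell =>
          let n := PySem.Str.count cell "\n" + 1
          if m < n then n else m) m) 0 < 5 then
      pvClean table
    else
      (pvClean table).foldl (fun expanded row =>
        let splits := row.map (fun cell => (PySem.Str.split? cell "\n").getD [])
        let n_lines := (PySem.List.max? (splits.map List.length) id).getD 0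
        if n_lines < 2 then expanded ++ [row]
        else expanded ++ (List.range n_lines).map (fun i =>
          splits.map (fun s => if i < s.length then PySem.Str.strip (s.getD i "") else ""))) []

-- ===== PORT B =====
-- termination measure lemmas for the while-loop transpose (cited by pvTranspose's decreasing_by)
theorem pvSumTailLe (cols : List (List String)) :
    ((cols.map List.tail).map List.length).sum ≤ (cols.map List.length).sum := by
  induction cols with
  | nil => simp
  | cons c cs ih =>
    simp only [List.map_cons, List.sum_cons, List.length_tail]
    omega

theorem pvSumTailLt (cols : List (List String)) (h : cols.all List.isEmpty = false) :
    ((cols.map List.tail).map List.length).sum < (cols.map List.length).sum := by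
  induction cols with
  | nil => simp at h
  | cons c cs ih =>
    simp only [List.all_cons] at h
    simp only [List.map_cons, List.sum_cons, List.length_tail]
    rcases Bool.and_eq_false_iff.mp h with hc | hcs
    · have h1 : 0 < c.length := by
        cases c with
        | nil => simp at hc
        | cons a t => simp
      have h2 := pvSumTailLe cs
      omega
    · have h2 := ih hcs
      have h1 : c.tail.length ≤ c.length := by simp [List.length_tail]
      omega

-- 'while any(splits): emit [s[0].strip() if s else "" for s in splits]; splits = [s[1:] for s in splits]'
def pvTranspose (cols : List (List String)) : List (List String) :=
  if h : cols.all List.isEmpty = true then []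
  else
    (cols.map (fun s => match s with | [] => "" | x :: _ => PySem.Str.strip x))
      :: pvTranspose (cols.map List.tail)
termination_by (cols.map List.length).sum
decreasing_by simpa using pvSumTailLt cols (Bool.eq_false_iff.mpr h)

def pvExpandRow (row : List String) : List (List String) :=
  let splits := row.map (fun cell => (PySem.Str.split? cell "\n").getD [])
  if (PySem.List.max? (splits.map List.length) id).getD 0 < 2 then [row]
  else pvTranspose splits

def expand_newline_cells_py_alt (table : List (List (Option String))) : List (List String) :=
  if table.length < 2 then
    pvClean table
  else if (pvClean table).any (fun row => row.any (fun cell => 4 ≤ PySem.Str.count cell "\n")) = false then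
    pvClean table
  else
    (pvClean table).flatMap pvExpandRow

-- ===== PRECONDITION & SPEC =====
-- Pre_ excludes exactly the inputs on which Python A raises (ValueError: max() of an empty
-- sequence): a table containing an empty row while some cleaned cell holds ≥ 4 newlines
-- (so the expansion phase is reached).  B raises there too; A returns on every other input.
def Pre_expand_newline_cells_py (table : List (List (Option String))) : Prop :=
  (∃ row ∈ table, ∃ c ∈ row, 4 ≤ PySem.Str.count (PySem.Str.strip (c.getD "")) "\n") →
    ∀ row ∈ table, row ≠ []

instance (table : List (List (Option String))) : Decidable (Pre_expand_newline_cells_py table) := by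
  unfold Pre_expand_newline_cells_py; infer_instance

def pvWitness_expand_newline_cells_py : List (List (Option String)) :=
  [[some "a"], [some "b"]]

def Spec_expand_newline_cells_py (table : List (List (Option String))) (out : List (List String)) : Prop := out = expand_newline_cells_py_alt table
instance (table : List (List (Option String))) (out : List (List String)) : Decidable (Spec_expand_newline_cells_py table out) := by unfold Spec_expand_newline_cells_py; infer_instance

-- ===== CLAIM (what is proved, stated in full; the proofs are below) =====
def Claim_equal_expand_newline_cells_py : Prop := ∀ (table : List (List (Option String))), Dom_expand_newline_cells_py table → Pre_expand_newline_cells_py table → Spec_expand_newline_cells_py table (expand_newline_cells_py table)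

-- ===== LEMMAS AND PROOFS =====

-- Python's max(...) over a ℕ-list, as PySem.List.max?, is the plain foldl max 0.
theorem pvMaxStep (a x : ℕ) (xs : List ℕ) :
    PySem.List.max? (a :: x :: xs) (id : ℕ → ℕ) = PySem.List.max? ((max a x) :: xs) id := by
  unfold PySem.List.max?
  rw [List.foldl_cons, List.foldl_cons, List.foldl_cons]
  congr 1
  show (if id a < id x then some x else some a) = some (max a x)
  split_ifs with hlt
  · have h' : a < x := hlt
    rw [Nat.max_eq_right h'.le]
  · have h' : x ≤ a := Nat.not_lt.mp hlt
    rw [Nat.max_eq_left h']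

theorem pvMaxGetD (l : List ℕ) : (PySem.List.max? l id).getD 0 = l.foldl max 0 := by
  cases l with
  | nil => rfl
  | cons x xs =>
    have aux : ∀ (t : List ℕ) (a : ℕ), PySem.List.max? (a :: t) (id : ℕ → ℕ) = some (t.foldl max a) := by
      intro t
      induction t with
      | nil => intro a; rfl
      | cons y ys ih =>
        intro a
        rw [pvMaxStep, ih, List.foldl_cons]
    rw [aux xs x, List.foldl_cons, Nat.zero_max]
    rfl

theorem pvFoldMaxLt (f : String → ℕ) (l : List String) (a k : ℕ) :
    l.foldl (fun m c => if m < f c then f c else m) a < k ↔ a < k ∧ ∀ c ∈ l, f c < k := by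
  induction l generalizing a with
  | nil => simp
  | cons c cs ih =>
    rw [List.foldl_cons, ih]
    have hb : ((if a < f c then f c else a) < k) ↔ (a < k ∧ f c < k) := by
      split_ifs with h <;> omega
    rw [hb]
    constructor
    · rintro ⟨⟨h1, h2⟩, h3⟩
      exact ⟨h1, fun x hx => (List.mem_cons.mp hx).elim (fun e => e ▸ h2) (h3 x)⟩
    · rintro ⟨h1, h2⟩
      exact ⟨⟨h1, h2 c List.mem_cons_self⟩, fun x hx => h2 x (List.mem_cons_of_mem c hx)⟩

-- A's max_lines guard coincides with B's any() test.
theorem pvGuard (clean : List (List String)) :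
    (clean.foldl (fun m row => row.foldl (fun m cell =>
        let n := PySem.Str.count cell "\n" + 1
        if m < n then n else m) m) 0 < 5)
    ↔ clean.any (fun row => row.any (fun cell => 4 ≤ PySem.Str.count cell "\n")) = false := by
  have h0 : clean.foldl (fun m row => row.foldl (fun m cell =>
        let n := PySem.Str.count cell "\n" + 1
        if m < n then n else m) m) 0
      = clean.flatten.foldl (fun m cell =>
        let n := PySem.Str.count cell "\n" + 1
        if m < n then n else m) 0 := (List.foldl_flatten).symm
  rw [h0]
  have h1 : (clean.flatten.foldl (fun m cell =>
        let n := PySem.Str.count cell "\n" + 1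
        if m < n then n else m) 0 < 5)
      ↔ 0 < 5 ∧ ∀ c ∈ clean.flatten, PySem.Str.count c "\n" + 1 < 5 :=
    pvFoldMaxLt (fun c => PySem.Str.count c "\n" + 1) clean.flatten 0 5
  rw [h1]
  simp only [List.any_eq_false, List.any_eq_true, decide_eq_true_eq, not_exists, not_and,
    List.mem_flatten]
  constructor
  · rintro ⟨-, h⟩
    intro row hrow cell hcell
    have := h cell ⟨row, hrow, hcell⟩
    omega
  · intro h
    refine ⟨by omega, ?_⟩
    rintro c ⟨row, hrow, hc⟩
    have := h row hrow c hc
    omega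

theorem pvFoldMaxZero (l : List ℕ) (h : ∀ x ∈ l, x = 0) : l.foldl max 0 = 0 := by
  induction l with
  | nil => rfl
  | cons x xs ih =>
    rw [List.foldl_cons, h x List.mem_cons_self]
    exact ih (fun y hy => h y (List.mem_cons_of_mem x hy))

theorem pvFoldMaxPred (l : List ℕ) : ∀ a : ℕ, (l.map (· - 1)).foldl max (a - 1) = (l.foldl max a) - 1 := by
  induction l with
  | nil => intro a; rfl
  | cons x xs ih =>
    intro a
    simp only [List.map_cons, List.foldl_cons]
    rw [show (max (a - 1) (x - 1)) = (max a x) - 1 by omega]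
    exact ih (max a x)

-- The while-loop transpose produces exactly row i ↦ guarded indexing, i < max length.
theorem pvTranspose_eq (cols : List (List String)) :
    pvTranspose cols = (List.range ((cols.map List.length).foldl max 0)).map
      (fun i => cols.map (fun s => if i < s.length then PySem.Str.strip (s.getD i "") else "")) := by
  by_cases h : cols.all List.isEmpty = true
  · rw [pvTranspose.eq_def, dif_pos h]
    have hz : (cols.map List.length).foldl max 0 = 0 := by
      apply pvFoldMaxZero
      intro x hx
      obtain ⟨s, hs, rfl⟩ := List.mem_map.mp hx
      have := List.all_eq_true.mp h s hs
      simpa [List.isEmpty_iff] using this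
    rw [hz]
    simp
  · rw [pvTranspose.eq_def, dif_neg h]
    have hmap : (cols.map List.tail).map List.length = (cols.map List.length).map (· - 1) := by
      rw [List.map_map, List.map_map]
      exact List.map_congr_left (fun s _ => by simp [List.length_tail])
    have hpred : ((cols.map List.tail).map List.length).foldl max 0
        = ((cols.map List.length).foldl max 0) - 1 := by
      rw [hmap]
      simpa using pvFoldMaxPred (cols.map List.length) 0
    have hone : 1 ≤ (cols.map List.length).foldl max 0 := by
      obtain ⟨s, hs, hne⟩ : ∃ s ∈ cols, ¬ (s.isEmpty = true) := by
        simpa [List.all_eq_true] using h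
      have hlen : s.length ∈ cols.map List.length := List.mem_map.mpr ⟨s, hs, rfl⟩
      have h2 := (PySem.List.le_foldl_max (cols.map List.length) 0).2 _ hlen
      have h3 : 1 ≤ s.length := by
        cases s with
        | nil => simp at hne
        | cons a t => simp
      omega
    have hN : (cols.map List.length).foldl max 0
        = ((cols.map List.tail).map List.length).foldl max 0 + 1 := by omega
    rw [hN, List.range_succ_eq_map, List.map_cons]
    congr 1
    · apply List.map_congr_left
      intro s _
      cases s with
      | nil => rfl
      | cons x t => simp
    · rw [pvTranspose_eq (cols.map List.tail)]
      conv_rhs => rw [List.map_map]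
      apply List.map_congr_left
      intro i _
      simp only [Function.comp_apply, List.map_map]
      apply List.map_congr_left
      intro s _
      cases s with
      | nil => simp
      | cons x t => simp
termination_by (cols.map List.length).sum
decreasing_by simpa using pvSumTailLt cols (Bool.eq_false_iff.mpr h)

-- One step of A's accumulator loop is '++ pvExpandRow row'.
theorem pvContribEq (e : List (List String)) (row : List String) :
    (let splits := row.map (fun cell => (PySem.Str.split? cell "\n").getD [])
     let n_lines := (PySem.List.max? (splits.map List.length) id).getD 0
     if n_lines < 2 then e ++ [row]
     else e ++ (List.range n_lines).map (fun i =>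
       splits.map (fun s => if i < s.length then PySem.Str.strip (s.getD i "") else "")))
    = e ++ pvExpandRow row := by
  unfold pvExpandRow
  dsimp only
  split_ifs with h
  · rfl
  · rw [pvTranspose_eq, pvMaxGetD]

-- ===== VERDICT (by name: the statement is the Claim_ definition above) =====
theorem expand_newline_cells_py_spec : Claim_equal_expand_newline_cells_py := by
  unfold Claim_equal_expand_newline_cells_py
  intro table _hdom _hpre
  unfold Spec_expand_newline_cells_py expand_newline_cells_py expand_newline_cells_py_alt
  by_cases hs : table.length < 2
  · rw [if_pos (Or.inr hs), if_pos hs]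
  · rw [if_neg (fun hor => hor.elim (fun he => hs (by rw [he]; decide)) hs), if_neg hs]
    by_cases hq : (pvClean table).any (fun row => row.any (fun cell => 4 ≤ PySem.Str.count cell "\n")) = true
    · rw [if_neg (by rw [pvGuard, hq]; simp), if_neg (by rw [hq]; simp)]
      have hfun : (fun (expanded : List (List String)) row =>
          let splits := row.map (fun cell => (PySem.Str.split? cell "\n").getD [])
          let n_lines := (PySem.List.max? (splits.map List.length) id).getD 0
          if n_lines < 2 then expanded ++ [row]
          else expanded ++ (List.range n_lines).map (fun i =>
            splits.map (fun s => if i < s.length then PySem.Str.strip (s.getD i "") else "")))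
          = (fun expanded row => expanded ++ pvExpandRow row) := by
        funext e row
        exact pvContribEq e row
      rw [hfun, PySem.List.foldl_append_eq_flatMap, List.nil_append]
    · have hq' : (pvClean table).any (fun row => row.any (fun cell => 4 ≤ PySem.Str.count cell "\n")) = false :=
        Bool.eq_false_iff.mpr hq
      rw [if_pos ((pvGuard (pvClean table)).mpr hq'), if_pos hq']
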